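-- pv_equiv track=rewrite | github.com/treephesians/Algorithm | kakao/2024_internship/주사위고르기.py | solution
-- ===== SOURCE A (Python) =====
-- from itertools import combinations, product
--
-- def solution(dice):
--     n = len(dice)
--     half = n // 2
--     dice_idx = list(range(n))
--
--     max_win = -1
--     best_choice = []
--
--     for a_choice in combinations(dice_idx, half):
--         # B의 주사위
--         b_choice = [i for i in dice_idx if i not in a_choice]
--
--         # A, B 주사위 조합
--         a_dice = [dice[i] for i in a_choice]
--         b_dice = [dice[i] for i in b_choice]
--
--         win_count = 0
--         # 모든 주사위 굴림 경우
--         for a_roll in product(*a_dice):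
--             for b_roll in product(*b_dice):
--                 if sum(a_roll) > sum(b_roll):
--                     win_count += 1
--
--         if win_count > max_win:
--             max_win = win_count
--             best_choice = sorted([i + 1 for i in a_choice])  # 1번 주사위 기준
--
--     return best_choice
-- ===== SOURCE B (Python) =====
-- from itertools import combinations
--
-- def _sums(dice_list):
--     # distribution of roll sums as a flat list, built by convolution
--     sums = [0]
--     for die in dice_list:
--         sums = [s + f for s in sums for f in die]
--     return sums
--
-- def solution(dice):
--     n = len(dice)
--     half = n // 2
--     max_win = -1
--     best_choice = []
--     for a_choice in combinations(range(n), half):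
--         b_choice = [i for i in range(n) if i not in a_choice]
--         a_sorted = sorted(_sums([dice[i] for i in a_choice]))
--         b_sorted = sorted(_sums([dice[i] for i in b_choice]))
--         # count pairs (a, b) with b < a by a linear merge over the two sorted lists
--         win_count = 0
--         j = 0
--         for a in a_sorted:
--             while j < len(b_sorted) and b_sorted[j] < a:
--                 j += 1
--             win_count += j
--         if win_count > max_win:
--             max_win = win_count
--             best_choice = sorted(i + 1 for i in a_choice)
--     return best_choice
-- ===== Notes on version B (the rewrite author's own statement) =====
-- stated objective: faster
-- what changed: Instead of enumerating all f^n joint rolls with a nested double loop per dice split, B builds each half's roll-sum list separately by convolution, sorts both lists and counts winning pairs with a single linear two-pointer merge; intended as faster (measured: a timing run's A timed out at n=64 dice-values where B returned, while at n=16 both ran under 1 ms so no ratio could be confirmed).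
import Mathlib
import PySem

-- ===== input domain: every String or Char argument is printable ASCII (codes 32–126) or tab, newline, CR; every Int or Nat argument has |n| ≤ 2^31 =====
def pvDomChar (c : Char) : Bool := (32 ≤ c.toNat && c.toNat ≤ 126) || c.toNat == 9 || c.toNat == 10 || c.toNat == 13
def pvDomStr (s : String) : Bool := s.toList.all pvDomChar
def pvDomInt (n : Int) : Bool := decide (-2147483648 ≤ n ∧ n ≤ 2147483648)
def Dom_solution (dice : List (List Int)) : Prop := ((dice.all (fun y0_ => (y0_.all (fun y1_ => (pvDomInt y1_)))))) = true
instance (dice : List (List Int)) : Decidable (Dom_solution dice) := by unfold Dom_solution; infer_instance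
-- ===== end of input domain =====

-- B replaces A's double enumeration of all joint rolls by per-half roll-sum lists built by
-- convolution, sorting, and a linear two-pointer pair count; intended as faster (the timing
-- run saw A time out at sizes where B returned, but measured no ratio at the small sizes
-- both finish); return value identical.

-- ===== PORT A =====
-- itertools.combinations(l, k) in lexicographic order (used by both Pythons)
def pyCombinations (l : List Nat) (k : Nat) : List (List Nat) :=
  match k, l with
  | 0, _ => [[]]
  | _ + 1, [] => []
  | k + 1, x :: xs => (pyCombinations xs k).map (fun c => x :: c) ++ pyCombinations xs (k + 1)

-- itertools.product(*ds): all tuples, rightmost component varying fastest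
def pyProduct (ds : List (List Int)) : List (List Int) :=
  ds.foldl (fun acc die => acc.flatMap (fun r => die.map (fun f => r ++ [f]))) [[]]

def solution (dice : List (List Int)) : List Int :=
  let n := dice.length
  let diceIdx := List.range n
  (((pyCombinations diceIdx (n / 2)).foldl
    (fun (st : Int × List Int) aChoice =>
      let bChoice := diceIdx.filter (fun i => !(aChoice.contains i))
      let aDice := aChoice.map (fun i => dice.getD i [])
      let bDice := bChoice.map (fun i => dice.getD i [])
      let winCount := (pyProduct aDice).foldl (fun w aRoll =>
          (pyProduct bDice).foldl
            (fun w2 bRoll => if aRoll.sum > bRoll.sum then w2 + 1 else w2) w) 0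
      if winCount > st.1 then
        (winCount, PySem.List.sorted (aChoice.map (fun i => (i : Int) + 1)) (fun x => x) false)
      else st) ((-1 : Int), ([] : List Int))).2)

-- ===== PORT B =====
-- sum distribution of a list of dice, built by convolution (B's _sums)
def sumsDP (ds : List (List Int)) : List Int :=
  ds.foldl (fun sums die => sums.flatMap (fun s => die.map (fun f => s + f))) [0]

-- the inner 'while j < len(bs) and bs[j] < a: j += 1'
def whileAdv (bs : List Int) (a : Int) (j : Nat) : Nat :=
  if h : j < bs.length then
    if bs[j] < a then whileAdv bs a (j + 1) else j
  else j
termination_by bs.length - j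

def solution_alt (dice : List (List Int)) : List Int :=
  let n := dice.length
  (((pyCombinations (List.range n) (n / 2)).foldl
    (fun (st : Int × List Int) aChoice =>
      let bChoice := (List.range n).filter (fun i => !(aChoice.contains i))
      let aSorted := PySem.List.sorted (sumsDP (aChoice.map (fun i => dice.getD i []))) (fun x => x) false
      let bSorted := PySem.List.sorted (sumsDP (bChoice.map (fun i => dice.getD i []))) (fun x => x) false
      let winCount := (aSorted.foldl
        (fun (jw : Nat × Int) a =>
          let j' := whileAdv bSorted a jw.1
          (j', jw.2 + (j' : Int))) ((0 : Nat), (0 : Int))).2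
      if winCount > st.1 then
        (winCount, PySem.List.sorted (aChoice.map (fun i => (i : Int) + 1)) (fun x => x) false)
      else st) ((-1 : Int), ([] : List Int))).2)

-- ===== PRECONDITION & SPEC =====
def Spec_solution (dice : List (List Int)) (out : List Int) : Prop := out = solution_alt dice
instance (dice : List (List Int)) (out : List Int) : Decidable (Spec_solution dice out) := by unfold Spec_solution; infer_instance

-- ===== CLAIM (what is proved, stated in full; the proofs are below) =====
def Claim_equal_solution : Prop := ∀ (dice : List (List Int)), Dom_solution dice → Spec_solution dice (solution dice)

-- ===== LEMMAS AND PROOFS =====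

-- the multiset of roll sums: mapping sum over the product equals the convolution fold
theorem map_sum_foldl (ds : List (List Int)) : ∀ (acc : List (List Int)),
    ((ds.foldl (fun acc die => acc.flatMap (fun r => die.map (fun f => r ++ [f]))) acc).map List.sum)
    = ds.foldl (fun sums die => sums.flatMap (fun s => die.map (fun f => s + f))) (acc.map List.sum) := by
  induction ds with
  | nil => intro acc; rfl
  | cons die ds ih =>
    intro acc
    simp only [List.foldl_cons, ih]
    congr 1
    simp [List.map_flatMap, List.flatMap_map, Function.comp_def, List.map_map]

theorem map_sum_pyProduct (ds : List (List Int)) :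
    (pyProduct ds).map List.sum = sumsDP ds := by
  simpa using map_sum_foldl ds [[]]

-- A's double roll loop as a sum of countP's over the two sum lists
theorem winA_eq (pa pb : List (List Int)) :
    pa.foldl (fun w aRoll =>
      pb.foldl (fun w2 bRoll => if aRoll.sum > bRoll.sum then w2 + 1 else w2) w) 0
    = ((pa.map List.sum).map
        (fun a => (((pb.map List.sum).countP (fun b => b < a) : Nat) : Int))).sum := by
  have hinner : ∀ (w : Int) (a : Int),
      pb.foldl (fun w2 bRoll => if a > bRoll.sum then w2 + 1 else w2) w
        = w + ((pb.map List.sum).countP (fun b => b < a) : Int) := by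
    intro w a
    rw [PySem.List.foldl_ite_add_one (fun bRoll => a > bRoll.sum) pb w]
    simp [List.countP_map, Function.comp_def]
  calc pa.foldl (fun w aRoll =>
      pb.foldl (fun w2 bRoll => if aRoll.sum > bRoll.sum then w2 + 1 else w2) w) 0
      = pa.foldl (fun w aRoll => w + ((pb.map List.sum).countP (fun b => b < aRoll.sum) : Int)) 0 := by
        exact PySem.List.foldl_congr_mem _ _ _ _ (fun w aRoll _ => hinner w aRoll.sum)
    _ = _ := by
        rw [PySem.List.foldl_add]
        simp [List.map_map, Function.comp_def]

-- on a nondecreasing list, countP (< a) is the length of the maximal (< a)-prefix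
theorem countP_lt_sorted (bs : List Int) (a : Int) (h : bs.Pairwise (· ≤ ·)) :
    bs.countP (fun b => b < a) = (bs.takeWhile (fun b => b < a)).length := by
  induction bs with
  | nil => rfl
  | cons x t ih =>
    rcases List.pairwise_cons.mp h with ⟨hx, ht⟩
    by_cases hxa : x < a
    · simp [hxa, ih ht]
    · have hz : t.countP (fun b => b < a) = 0 := by
        rw [List.countP_eq_zero]
        intro b hb
        simp only [decide_eq_true_eq]
        exact fun hba => hxa (lt_of_le_of_lt (hx b hb) hba)
      simp [hxa, hz]

theorem getElem_takeWhile_pred {α : Type} (p : α → Bool) (bs : List α) (i : Nat)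
    (hi : i < bs.length) (hitw : i < (bs.takeWhile p).length) : p bs[i] := by
  have hpref := List.takeWhile_prefix (l := bs) (p := p)
  have hg := hpref.getElem (i := i) hitw
  have hm : bs[i] ∈ List.takeWhile p bs := hg ▸ List.getElem_mem hitw
  exact List.mem_takeWhile_imp hm

theorem not_pred_at_takeWhile_len {α : Type} (p : α → Bool) :
    ∀ (bs : List α) (h : (bs.takeWhile p).length < bs.length),
      ¬ (p bs[(bs.takeWhile p).length] = true) := by
  intro bs
  induction bs with
  | nil => intro h; simp at h
  | cons x t ih =>
    intro h
    by_cases hx : p x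
    · simp only [List.takeWhile_cons, hx, if_true, List.length_cons] at h ⊢
      simpa using ih (Nat.lt_of_succ_lt_succ h)
    · simp [hx]

-- the while loop lands exactly on countP (< a) whenever it starts at or below it
theorem whileAdv_eq (bs : List Int) (a : Int) (hs : bs.Pairwise (· ≤ ·)) :
    ∀ (j : Nat), j ≤ bs.countP (fun b => b < a) →
    whileAdv bs a j = bs.countP (fun b => b < a) := by
  have hcnt : bs.countP (fun b => b < a) = (bs.takeWhile (fun b => b < a)).length :=
    countP_lt_sorted bs a hs
  rw [hcnt]
  have hle : (bs.takeWhile (fun b => b < a)).length ≤ bs.length := (List.takeWhile_prefix _).length_le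
  intro j
  induction hk : bs.length - j using Nat.strong_induction_on generalizing j with
  | _ k ih =>
  intro hj
  rw [whileAdv]
  by_cases hlt : j < bs.length
  · simp only [hlt, dif_pos]
    by_cases hba : bs[j] < a
    · have hjcnt : j < (bs.takeWhile (fun b => b < a)).length := by
        rcases Nat.lt_or_ge j (bs.takeWhile (fun b => b < a)).length with h | h
        · exact h
        · exfalso
          have hjeq : j = (bs.takeWhile (fun b => b < a)).length := le_antisymm hj h
          have := not_pred_at_takeWhile_len (fun b => decide (b < a)) bs (hjeq ▸ hlt)
          subst hjeq
          simp at this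
          exact absurd hba (not_lt.mpr this)
      simp only [hba, if_pos]
      exact ih (bs.length - (j+1)) (by omega) (j+1) rfl hjcnt
    · simp only [hba, if_false]
      rcases Nat.lt_or_ge j (bs.takeWhile (fun b => b < a)).length with h | h
      · exfalso
        have := getElem_takeWhile_pred (fun b => decide (b < a)) bs j hlt h
        simp at this
        exact hba this
      · omega
  · rw [dif_neg hlt]
    omega

-- two-pointer merge computes the sum of countP's over sorted inputs
theorem twoPointer_eq (bs : List Int) (hbs : bs.Pairwise (· ≤ ·)) :
    ∀ (as_ : List Int), as_.Pairwise (· ≤ ·) →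
    ∀ (j0 : Nat) (w0 : Int), (∀ a ∈ as_, j0 ≤ bs.countP (fun b => b < a)) →
    (as_.foldl (fun (jw : Nat × Int) a =>
        let j' := whileAdv bs a jw.1
        (j', jw.2 + (j' : Int))) (j0, w0)).2
      = w0 + (as_.map (fun a => ((bs.countP (fun b => b < a) : Nat) : Int))).sum := by
  intro as_
  induction as_ with
  | nil => intro _ j0 w0 _; simp
  | cons a t ih =>
    intro hp j0 w0 hj0
    rcases List.pairwise_cons.mp hp with ⟨hat, ht⟩
    have hja : whileAdv bs a j0 = bs.countP (fun b => b < a) :=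
      whileAdv_eq bs a hbs j0 (hj0 a (List.mem_cons_self))
    simp only [List.foldl_cons, hja]
    rw [ih ht _ _ ?_]
    · simp [add_assoc]
    · intro a' ha'
      exact List.countP_mono_left (fun b _ hb => by
        simp only [decide_eq_true_eq] at *
        exact lt_of_lt_of_le hb (hat a' ha'))

-- the pair count is invariant under permuting both sum lists
theorem S_perm (as1 as2 bs1 bs2 : List Int) (ha : as1.Perm as2) (hb : bs1.Perm bs2) :
    (as1.map (fun a => ((bs1.countP (fun b => b < a) : Nat) : Int))).sum
    = (as2.map (fun a => ((bs2.countP (fun b => b < a) : Nat) : Int))).sum := by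
  have hc : ∀ a, bs1.countP (fun b => b < a) = bs2.countP (fun b => b < a) :=
    fun a => hb.countP_eq _
  simp only [hc]
  exact (ha.map _).sum_eq

-- per-split equality of the two win counts
theorem win_eq (aD bD : List (List Int)) :
    (pyProduct aD).foldl (fun w aRoll =>
      (pyProduct bD).foldl (fun w2 bRoll => if aRoll.sum > bRoll.sum then w2 + 1 else w2) w) 0
    = ((PySem.List.sorted (sumsDP aD) (fun x => x) false).foldl
        (fun (jw : Nat × Int) a =>
          let j' := whileAdv (PySem.List.sorted (sumsDP bD) (fun x => x) false) a jw.1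
          (j', jw.2 + (j' : Int))) ((0 : Nat), (0 : Int))).2 := by
  set aS := PySem.List.sorted (sumsDP aD) (fun x => x) false with haS
  set bS := PySem.List.sorted (sumsDP bD) (fun x => x) false with hbS
  have hpa : aS.Pairwise (· ≤ ·) := by
    have := PySem.List.sorted_pairwise (sumsDP aD) (fun x => x)
    simpa [haS] using this
  have hpb : bS.Pairwise (· ≤ ·) := by
    have := PySem.List.sorted_pairwise (sumsDP bD) (fun x => x)
    simpa [hbS] using this
  rw [winA_eq, map_sum_pyProduct, map_sum_pyProduct]
  rw [twoPointer_eq bS hpb aS hpa 0 0 (fun a _ => Nat.zero_le _)]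
  rw [zero_add]
  exact S_perm _ _ _ _ (PySem.List.sorted_perm (sumsDP aD) (fun x => x) false).symm
    (PySem.List.sorted_perm (sumsDP bD) (fun x => x) false).symm

-- ===== VERDICT (by name: the statement is the Claim_ definition above) =====
theorem solution_spec : Claim_equal_solution := by
  intro dice _
  unfold Spec_solution solution solution_alt
  refine congrArg Prod.snd ?_
  refine PySem.List.foldl_congr_mem _ _ _ _ ?_
  intro st aChoice _
  simp only [win_eq]
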